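-- pv_equiv track=rewrite | github.com/jahunt1274/data_analysis | analyzers/team_analyzer.py | _is_linear_progression
-- ===== SOURCE A (Python) =====
-- from typing import Dict, List, Optional, Any
--
-- def _is_linear_progression(
--     step_sequence: List[str], framework_steps: List[str]
-- ) -> bool:
--     """
--     Determine if a step sequence follows a linear progression.
--
--     Args:
--         step_sequence: Sequence of steps in order of completion
--         framework_steps: List of all steps in the framework in standard order
--
--     Returns:
--         bool: True if progression is linear, False otherwise
--     """
--     if not step_sequence:
--         return False
--
--     # Get indices of steps in framework order
--     try:
--         indices = [framework_steps.index(step) for step in step_sequence]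
--     except ValueError:
--         # Step not in framework_steps
--         return False
--
--     # Check if indices are in ascending order
--     return all(indices[i] <= indices[i + 1] for i in range(len(indices) - 1))
-- ===== SOURCE B (Python) =====
-- def _is_linear_progression(step_sequence, framework_steps):
--     """Different algorithm: reduce the order test to a subsequence check.
--     Dedup framework_steps to its first occurrences (which are ordered by first
--     index), collapse consecutive duplicates in step_sequence, and greedily
--     match the collapsed sequence as a subsequence of the deduped framework
--     with a single consuming iterator. No .index calls."""
--     if not step_sequence:
--         return False
--     seen = set()
--     fw_firsts = []
--     for s in framework_steps:
--         if s not in seen: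
--             seen.add(s)
--             fw_firsts.append(s)
--     it = iter(fw_firsts)
--     prev = None
--     for step in step_sequence:
--         if prev is not None and step == prev:
--             continue
--         for f in it:
--             if f == step:
--                 break
--         else:
--             return False
--         prev = step
--     return True
-- ===== Notes on version B (the rewrite author's own statement) =====
-- stated objective: alternative
-- what changed: Replaced per-step framework.index scans plus a pairwise all() over the index list with a different algorithm: dedup the framework to its first occurrences, collapse consecutive duplicate steps, and greedily match the collapsed sequence as a subsequence of the deduped framework with one consuming iterator (no index computation at all).
import Mathlib
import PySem

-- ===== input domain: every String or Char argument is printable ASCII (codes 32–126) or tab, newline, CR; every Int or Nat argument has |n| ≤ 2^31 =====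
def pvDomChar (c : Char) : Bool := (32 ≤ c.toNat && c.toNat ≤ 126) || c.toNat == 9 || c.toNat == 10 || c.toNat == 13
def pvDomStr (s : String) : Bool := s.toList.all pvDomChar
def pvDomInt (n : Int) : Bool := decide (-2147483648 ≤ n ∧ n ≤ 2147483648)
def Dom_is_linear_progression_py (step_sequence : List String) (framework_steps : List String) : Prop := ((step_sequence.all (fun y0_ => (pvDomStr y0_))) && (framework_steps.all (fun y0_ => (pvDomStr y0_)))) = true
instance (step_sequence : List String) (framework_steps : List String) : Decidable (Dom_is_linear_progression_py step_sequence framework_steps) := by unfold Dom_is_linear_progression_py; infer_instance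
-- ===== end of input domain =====

-- B replaces A's per-step framework.index scans + pairwise all() with a subsequence check:
-- dedup the framework to first occurrences, collapse consecutive duplicate steps, greedy one-iterator match.

-- ===== PORT A =====
-- A: guard on empty, build the full list of framework indices (none if any step missing,
-- mirroring the try/except ValueError), then a separate pairwise all() pass over the index list.
def is_linear_progression_py (step_sequence : List String) (framework_steps : List String) : Bool :=
  match step_sequence with
  | [] => false
  | _ =>
    match step_sequence.mapM (fun step => PySem.List.index? framework_steps step) with
    | none => false
    | some indices =>
      (List.range (indices.length - 1)).all
        (fun i => indices.getD i 0 ≤ indices.getD (i + 1) 0)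

-- ===== PORT B =====
-- the seen-set loop building fw_firsts (first occurrences, in framework order)
def fwFirsts (seen : PySem.Set String) : List String → List String
  | [] => []
  | s :: r => if s ∈ seen then fwFirsts seen r else s :: fwFirsts (PySem.Set.add seen s) r

-- the inner 'for f in it: if f == step: break / else: return False' over the consuming iterator:
-- returns the iterator's remaining suffix after the break, or none if exhausted
def dropUntil (step : String) : List String → Option (List String)
  | [] => none
  | f :: r => if f = step then some r else dropUntil step r

-- the outer loop: rem = the iterator's remaining elements, prev = last matched step
def matchGo : List String → Option String → List String → Bool
  | _, _, [] => true
  | rem, prev, step :: rest =>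
    if prev = some step then matchGo rem prev rest
    else
      match dropUntil step rem with
      | none => false
      | some rem' => matchGo rem' (some step) rest

def is_linear_progression_py_alt (step_sequence : List String) (framework_steps : List String) : Bool :=
  if step_sequence.isEmpty then false
  else matchGo (fwFirsts PySem.Set.empty framework_steps) none step_sequence

-- ===== PRECONDITION & SPEC =====
def Spec_is_linear_progression_py (step_sequence : List String) (framework_steps : List String) (out : Bool) : Prop := out = is_linear_progression_py_alt step_sequence framework_steps
instance (step_sequence : List String) (framework_steps : List String) (out : Bool) : Decidable (Spec_is_linear_progression_py step_sequence framework_steps out) := by unfold Spec_is_linear_progression_py; infer_instance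

-- ===== CLAIM (what is proved, stated in full; the proofs are below) =====
def Claim_equal_is_linear_progression_py : Prop := ∀ (step_sequence : List String) (framework_steps : List String), Dom_is_linear_progression_py step_sequence framework_steps → Spec_is_linear_progression_py step_sequence framework_steps (is_linear_progression_py step_sequence framework_steps)

-- ===== LEMMAS AND PROOFS =====

-- ---- bridge for A: the range-indexed pairwise check as a structural chain ----
def chainBool : List Nat → Bool
  | [] => true
  | [_] => true
  | a :: b :: r => (a ≤ b) && chainBool (b :: r)

theorem rangeAll_eq_chainBool (l : List Nat) :
    (List.range (l.length - 1)).all (fun i => l.getD i 0 ≤ l.getD (i + 1) 0) = chainBool l := by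
  match l with
  | [] => rfl
  | [a] => rfl
  | a :: b :: r =>
    have ih := rangeAll_eq_chainBool (b :: r)
    simp only [List.length_cons, Nat.add_sub_cancel, List.range_succ_eq_map,
      List.all_cons, List.all_map] at *
    simp only [chainBool, List.getD_cons_zero, List.getD_cons_succ]
    rw [← ih]
    rfl

-- A re-expressed as a fused index-threading loop (proof-side device only)
def linProgGo (framework_steps : List String) (prev_index : Int) : List String → Bool
  | [] => true
  | step :: rest =>
    match PySem.List.index? framework_steps step with
    | none => false
    | some idx => if (idx : Int) < prev_index then false else linProgGo framework_steps idx rest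

def chainFrom (prev : Int) : List Nat → Bool
  | [] => true
  | i :: r => if (i : Int) < prev then false else chainFrom (i : Int) r

theorem go_eq_chainFrom (fs : List String) (prev : Int) (ss : List String) :
    linProgGo fs prev ss =
      match ss.mapM (fun step => PySem.List.index? fs step) with
      | none => false
      | some idxs => chainFrom prev idxs := by
  induction ss generalizing prev with
  | nil => rfl
  | cons s rest ih =>
    rw [List.mapM_cons]
    cases h : PySem.List.index? fs s with
    | none => simp only [linProgGo, h]; rfl
    | some i =>
      simp only [linProgGo, h, Option.bind_eq_bind, Option.bind]
      rw [ih]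
      cases hr : rest.mapM (fun step => PySem.List.index? fs step) with
      | none =>
        by_cases hlt : (i : Int) < prev <;> simp [hlt]
      | some idxs =>
        by_cases hlt : (i : Int) < prev <;> simp [hlt, chainFrom]

theorem chainFrom_nat (a : Nat) (l : List Nat) : chainFrom (a : Int) l = chainBool (a :: l) := by
  induction l generalizing a with
  | nil => rfl
  | cons b r ih =>
    simp only [chainFrom, chainBool]
    by_cases h : (b : Int) < (a : Int)
    · have : ¬ a ≤ b := by exact_mod_cast Int.not_le.mpr h
      simp [h, this]
    · have hb : a ≤ b := by exact_mod_cast Int.not_lt.mp h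
      simp [h, hb, ih]

theorem chainFrom_neg_one (l : List Nat) : chainFrom (-1) l = chainBool l := by
  cases l with
  | nil => rfl
  | cons a r =>
    simp only [chainFrom]
    have h : ¬ ((a : Int) < -1) := by omega
    rw [if_neg h, chainFrom_nat]

-- ---- facts about fwFirsts ----
def IdxLt (fs : List String) (a b : String) : Prop :=
  ∃ i j, PySem.List.index? fs a = some i ∧ PySem.List.index? fs b = some j ∧ i < j

theorem mem_fwFirsts (l : List String) (seen : PySem.Set String) (s : String) :
    s ∈ fwFirsts seen l ↔ s ∈ l ∧ s ∉ seen := by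
  induction l generalizing seen with
  | nil => simp [fwFirsts]
  | cons x r ih =>
    simp only [fwFirsts]
    by_cases hx : x ∈ seen
    · rw [if_pos hx, ih]
      constructor
      · rintro ⟨h1, h2⟩; exact ⟨List.mem_cons_of_mem _ h1, h2⟩
      · rintro ⟨h1, h2⟩
        rcases List.mem_cons.mp h1 with rfl | h1
        · exact absurd hx h2
        · exact ⟨h1, h2⟩
    · rw [if_neg hx]
      simp only [List.mem_cons, ih, PySem.Set.mem_add]
      constructor
      · rintro (rfl | ⟨h1, h2⟩)
        · exact ⟨Or.inl rfl, hx⟩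
        · push Not at h2
          exact ⟨Or.inr h1, h2.1⟩
      · rintro ⟨rfl | h1, h2⟩
        · exact Or.inl rfl
        · by_cases hsx : s = x
          · exact Or.inl hsx
          · exact Or.inr ⟨h1, by push Not; exact ⟨h2, hsx⟩⟩

theorem pairwise_fwFirsts (l : List String) (seen : PySem.Set String) :
    (fwFirsts seen l).Pairwise (IdxLt l) := by
  induction l generalizing seen with
  | nil => simp [fwFirsts]
  | cons x r ih =>
    have lift : ∀ (seen' : PySem.Set String), x ∈ seen' →
        (fwFirsts seen' r).Pairwise (IdxLt (x :: r)) := by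
      intro seen' hx
      refine ((ih seen').imp_of_mem ?_)
      intro a b ha hb hab
      have ha' := (mem_fwFirsts r seen' a).mp ha
      have hb' := (mem_fwFirsts r seen' b).mp hb
      have hax : x ≠ a := fun h => ha'.2 (h ▸ hx)
      have hbx : x ≠ b := fun h => hb'.2 (h ▸ hx)
      obtain ⟨i, j, hi, hj, hij⟩ := hab
      refine ⟨i + 1, j + 1, ?_, ?_, by omega⟩
      · rw [PySem.List.index?_cons_of_ne _ hax, hi]; rfl
      · rw [PySem.List.index?_cons_of_ne _ hbx, hj]; rfl
    simp only [fwFirsts]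
    by_cases hx : x ∈ seen
    · rw [if_pos hx]; exact lift seen hx
    · rw [if_neg hx]
      refine List.pairwise_cons.mpr ⟨?_, lift _ ((PySem.Set.mem_add _ _ _).mpr (Or.inr rfl))⟩
      intro b hb
      have hb' := (mem_fwFirsts r _ b).mp hb
      have hbx : x ≠ b := fun h => hb'.2 ((PySem.Set.mem_add _ _ _).mpr (Or.inr h.symm))
      have hbmem : b ∈ r := hb'.1
      have : PySem.List.index? r b ≠ none := fun h0 =>
        ((PySem.List.index?_eq_none_iff r b).mp h0) hbmem
      obtain ⟨j, hj⟩ := Option.ne_none_iff_exists'.mp this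
      refine ⟨0, j + 1, PySem.List.index?_cons_self .., ?_, by omega⟩
      rw [PySem.List.index?_cons_of_ne _ hbx, hj]; rfl

-- ---- dropUntil facts ----
theorem dropUntil_eq_none_iff (step : String) (l : List String) :
    dropUntil step l = none ↔ step ∉ l := by
  induction l with
  | nil => simp [dropUntil]
  | cons f r ih =>
    simp only [dropUntil]
    by_cases h : f = step
    · simp [h]
    · simp [h, ih, Ne.symm h]

theorem dropUntil_eq_some (step : String) (l l' : List String)
    (h : dropUntil step l = some l') : ∃ l0, l = l0 ++ step :: l' := by
  induction l generalizing l' with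
  | nil => simp [dropUntil] at h
  | cons f r ih =>
    simp only [dropUntil] at h
    by_cases hf : f = step
    · rw [if_pos hf] at h
      exact ⟨[], by simp [hf, (Option.some_injective _ h).symm]⟩
    · rw [if_neg hf] at h
      obtain ⟨l0, hl0⟩ := ih l' h
      exact ⟨f :: l0, by simp [hl0]⟩

theorem index?_of_mem (fs : List String) (s : String) (h : s ∈ fs) :
    ∃ i, PySem.List.index? fs s = some i := by
  have : PySem.List.index? fs s ≠ none := fun h0 =>
    ((PySem.List.index?_eq_none_iff fs s).mp h0) h
  exact Option.ne_none_iff_exists'.mp this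

-- ---- the main invariant: B's two-pointer match equals the fused index loop ----
theorem matchGo_eq_linProgGo (fs F : List String)
    (hmem : ∀ s, s ∈ F ↔ s ∈ fs) (hpw : F.Pairwise (IdxLt fs)) :
    ∀ (ss rem : List String) (prev : Option String) (pi : Int),
      ((prev = none ∧ rem = F ∧ pi = -1) ∨
       (∃ p pre ip, prev = some p ∧ F = pre ++ p :: rem ∧
          PySem.List.index? fs p = some ip ∧ pi = (ip : Int))) →
      linProgGo fs pi ss = matchGo rem prev ss := by
  intro ss
  induction ss with
  | nil => intro rem prev pi _; cases prev <;> rfl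
  | cons s rest ih =>
    intro rem prev pi hcorr
    by_cases hps : prev = some s
    · -- consecutive duplicate: both sides keep their state
      rcases hcorr with ⟨hp, _, _⟩ | ⟨p, pre, ip, hp, hsplit, hidx, hpi⟩
      · rw [hp] at hps; exact absurd hps (by simp)
      · have hpeq : p = s := by rw [hp] at hps; injection hps
        subst hpeq hpi
        simp only [linProgGo, hidx, matchGo, if_pos hps]
        rw [if_neg (by omega)]
        subst hps
        exact ih rem (some p) (ip : Int) (Or.inr ⟨p, pre, ip, rfl, hsplit, hidx, rfl⟩)
    · simp only [matchGo, if_neg hps]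
      cases hd : dropUntil s rem with
      | none =>
        -- s not in the remaining iterator: B returns false; show A's loop does too
        have hsnr : s ∉ rem := (dropUntil_eq_none_iff s rem).mp hd
        by_cases hsfs : s ∈ fs
        · obtain ⟨is, his⟩ := index?_of_mem fs s hsfs
          have hsF : s ∈ F := (hmem s).mpr hsfs
          rcases hcorr with ⟨_, hrem, _⟩ | ⟨p, pre, ip, hp, hsplit, hidx, hpi⟩
          · exact absurd (hrem ▸ hsF) hsnr
          · have hsp : s ≠ p := fun h => hps (hp ▸ h ▸ rfl)
            have hspre : s ∈ pre := by
              rw [hsplit] at hsF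
              rcases List.mem_append.mp hsF with h | h
              · exact h
              · rcases List.mem_cons.mp h with h | h
                · exact absurd h hsp
                · exact absurd h hsnr
            have hlt : is < ip := by
              rw [hsplit] at hpw
              obtain ⟨_, _, hcross⟩ := List.pairwise_append.mp hpw
              obtain ⟨i', j', hi', hj', hij⟩ := hcross s hspre p (List.mem_cons_self ..)
              rw [his] at hi'; rw [hidx] at hj'
              injection hi' with h1; injection hj' with h2
              omega
            simp only [linProgGo, his, hpi]
            rw [if_pos (by exact_mod_cast hlt)]
        · have hnone : PySem.List.index? fs s = none :=
            (PySem.List.index?_eq_none_iff fs s).mpr hsfs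
          simp only [linProgGo]
          rw [hnone]
      | some rem' =>
        obtain ⟨l0, hl0⟩ := dropUntil_eq_some s rem rem' hd
        have hsrem : s ∈ rem := by rw [hl0]; simp
        rcases hcorr with ⟨_, hrem, hpi⟩ | ⟨p, pre, ip, hp, hsplit, hidx, hpi⟩
        · -- first matched step
          have hsfs : s ∈ fs := (hmem s).mp (hrem ▸ hsrem)
          obtain ⟨is, his⟩ := index?_of_mem fs s hsfs
          simp only [linProgGo, his, hpi]
          rw [if_neg (by omega)]
          exact ih rem' (some s) (is : Int)
            (Or.inr ⟨s, l0, is, rfl, by rw [← hrem]; exact hl0, his, rfl⟩)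
        · -- a later step: pairwise gives index strictly above prev's
          have hsF : s ∈ F := by rw [hsplit]; simp [hsrem]
          obtain ⟨is, his⟩ := index?_of_mem fs s ((hmem s).mp hsF)
          have hgt : ip < is := by
            rw [hsplit] at hpw
            obtain ⟨_, hpr, _⟩ := List.pairwise_append.mp hpw
            obtain ⟨hhead, _⟩ := List.pairwise_cons.mp hpr
            obtain ⟨i', j', hi', hj', hij⟩ := hhead s hsrem
            rw [hidx] at hi'; rw [his] at hj'
            injection hi' with h1; injection hj' with h2
            omega
          simp only [linProgGo, his, hpi]
          rw [if_neg (by exact_mod_cast not_lt.mpr (le_of_lt hgt))]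
          refine ih rem' (some s) (is : Int)
            (Or.inr ⟨s, pre ++ p :: l0, is, rfl, ?_, his, rfl⟩)
          rw [hsplit, hl0]; simp

-- ===== VERDICT (by name: the statement is the Claim_ definition above) =====
theorem is_linear_progression_py_spec : Claim_equal_is_linear_progression_py := by
  intro ss fs _
  unfold Spec_is_linear_progression_py is_linear_progression_py is_linear_progression_py_alt
  cases ss with
  | nil => rfl
  | cons s rest =>
    simp only [List.isEmpty_cons, Bool.false_eq_true, if_false]
    have hA : (match (s :: rest).mapM (fun step => PySem.List.index? fs step) with
        | none => false
        | some indices =>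
          (List.range (indices.length - 1)).all
            (fun i => indices.getD i 0 ≤ indices.getD (i + 1) 0))
        = linProgGo fs (-1) (s :: rest) := by
      rw [go_eq_chainFrom]
      cases h : (s :: rest).mapM (fun step => PySem.List.index? fs step) with
      | none => rfl
      | some idxs =>
        show ((List.range (idxs.length - 1)).all
            fun i => decide (idxs.getD i 0 ≤ idxs.getD (i + 1) 0)) = chainFrom (-1) idxs
        rw [rangeAll_eq_chainBool, chainFrom_neg_one]
    rw [hA]
    exact matchGo_eq_linProgGo fs (fwFirsts PySem.Set.empty fs)
      (fun t => by rw [mem_fwFirsts]; simp [PySem.Set.empty])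
      (pairwise_fwFirsts fs PySem.Set.empty)
      (s :: rest) _ none (-1) (Or.inl ⟨rfl, rfl, rfl⟩)
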